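-- pv_equiv track=rewrite | github.com/oosuhada/codetest-study | 프로그래머스/0/120836. 순서쌍의 개수/20260413_185526_run_순서쌍의 개수.py | solution
-- ===== SOURCE A (Python) =====
-- def solution(n):
--     answer = 0
--     i = 1
--
--     while i>0 and i<n:
--         if n % i == 0:
--             answer += 1
--             i += 1
--         else:
--             i += 1
--
--     return answer
-- ===== SOURCE B (Python) =====
-- import math
--
-- def solution(n):
--     # Count divisors of n below n: pair divisors up to isqrt(n), then drop n itself.
--     if n <= 0:
--         return 0
--     cnt = 0
--     for i in range(1, math.isqrt(n) + 1):
--         if n % i == 0: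
--             cnt += 1 if i * i == n else 2
--     return cnt - 1
-- ===== Notes on version B (the rewrite author's own statement) =====
-- stated objective: faster
-- what changed: Instead of scanning every candidate below n for divisibility, B counts divisors in pairs (i, n//i) for i up to isqrt(n) and then drops n itself.
import Mathlib
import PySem

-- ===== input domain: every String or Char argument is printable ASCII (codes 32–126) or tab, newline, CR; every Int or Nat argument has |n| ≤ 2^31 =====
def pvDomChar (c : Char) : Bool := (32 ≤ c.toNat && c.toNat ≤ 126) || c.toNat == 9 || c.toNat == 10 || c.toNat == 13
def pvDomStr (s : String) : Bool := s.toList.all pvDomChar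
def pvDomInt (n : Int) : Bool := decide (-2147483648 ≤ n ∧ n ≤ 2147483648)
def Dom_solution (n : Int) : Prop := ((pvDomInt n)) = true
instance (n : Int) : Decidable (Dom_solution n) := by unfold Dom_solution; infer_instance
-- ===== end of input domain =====

-- B replaces A's linear scan over [1, n) by a paired-divisor count up to isqrt(n), dropping n itself.

-- ===== PORT A =====
def solutionLoop (n answer i : Int) : Int :=
  if 0 < i ∧ i < n then
    if PySem.Int.mod n i = 0 then solutionLoop n (answer + 1) (i + 1)
    else solutionLoop n answer (i + 1)
  else answer
termination_by (n - i).toNat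
decreasing_by all_goals omega

def solution (n : Int) : Int := solutionLoop n 0 1

-- ===== PORT B =====
def solution_alt (n : Int) : Int :=
  if n ≤ 0 then 0
  else
    (PySem.List.pyRange 1 ((Nat.sqrt n.toNat : Int) + 1) 1).foldl
      (fun cnt i => if PySem.Int.mod n i = 0 then cnt + (if i * i = n then 1 else 2) else cnt) 0
    - 1

-- ===== PRECONDITION & SPEC =====
def Spec_solution (n : Int) (out : Int) : Prop := out = solution_alt n
instance (n : Int) (out : Int) : Decidable (Spec_solution n out) := by unfold Spec_solution; infer_instance

-- ===== CLAIM (what is proved, stated in full; the proofs are below) =====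
def Claim_equal_solution : Prop := ∀ (n : Int), Dom_solution n → Spec_solution n (solution n)

-- ===== LEMMAS AND PROOFS =====

lemma loop_sum (n a i : Int) (hi : 0 < i) :
    solutionLoop n a i
      = a + ((PySem.List.pyRange i n 1).map
          (fun j => if PySem.Int.mod n j = 0 then (1:ℤ) else 0)).sum := by
  rw [solutionLoop]
  by_cases h : i < n
  · rw [if_pos ⟨hi, h⟩, PySem.List.pyRange_one_cons h]
    simp only [List.map_cons, List.sum_cons]
    by_cases hm : PySem.Int.mod n i = 0
    · rw [if_pos hm, if_pos hm, loop_sum n (a+1) (i+1) (by omega)]; ring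
    · rw [if_neg hm, if_neg hm, loop_sum n a (i+1) (by omega)]; ring
  · rw [if_neg (by omega), PySem.List.pyRange_one_eq_nil (by omega)]; simp
termination_by (n - i).toNat
decreasing_by all_goals omega

lemma sum_map_range (g : ℕ → ℤ) (N : ℕ) :
    ((List.range N).map g).sum = ∑ k ∈ Finset.range N, g k := by
  induction N with
  | zero => simp
  | succ N ih => simp [List.range_succ, Finset.sum_range_succ, ih]

lemma solution_eq (m : ℕ) :
    solution (m:ℤ) = ∑ j ∈ Finset.Ico 1 m, (if j ∣ m then (1:ℤ) else 0) := by
  rw [solution, loop_sum _ _ _ one_pos, PySem.List.pyRange_one, List.map_map,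
    sum_map_range, zero_add]
  have hN : ((m:ℤ) - 1).toNat = m - 1 := by omega
  rw [hN, Finset.sum_Ico_eq_sum_range]
  apply Finset.sum_congr rfl
  intro k _
  simp only [Function.comp]
  have h1 : (1 : ℤ) + (k:ℤ) = ((1+k : ℕ) : ℤ) := by push_cast; ring
  simp only [h1, PySem.Int.mod_natCast]
  have h2 : ((m % (1+k) : ℕ) : ℤ) = 0 ↔ (1+k) ∣ m := by
    rw [Nat.cast_eq_zero, ← Nat.dvd_iff_mod_eq_zero]
  norm_cast
  simp [Nat.dvd_iff_mod_eq_zero]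

lemma alt_eq (m : ℕ) (hm : 0 < m) :
    solution_alt (m:ℤ)
      = (∑ i ∈ Finset.Icc 1 (Nat.sqrt m),
          (if i ∣ m then (if i*i = m then (1:ℤ) else 2) else 0)) - 1 := by
  rw [solution_alt, if_neg (by omega)]
  simp only [Int.toNat_natCast]
  have hfold : (fun (cnt i : ℤ) => if PySem.Int.mod (m:ℤ) i = 0 then cnt + (if i*i = (m:ℤ) then 1 else 2) else cnt)
      = fun (cnt i : ℤ) => cnt + (if PySem.Int.mod (m:ℤ) i = 0 then (if i*i = (m:ℤ) then (1:ℤ) else 2) else 0) := by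
    funext c i; split_ifs <;> simp
  rw [hfold, PySem.List.foldl_add, zero_add, PySem.List.pyRange_one, List.map_map,
    sum_map_range]
  have hN : ((Nat.sqrt m : ℤ) + 1 - 1).toNat = Nat.sqrt m := by omega
  rw [hN, show Finset.Icc 1 (Nat.sqrt m) = Finset.Ico 1 (Nat.sqrt m + 1) from
    (Finset.Ico_add_one_right_eq_Icc 1 _).symm, Finset.sum_Ico_eq_sum_range]
  simp only [Nat.add_sub_cancel]
  congr 1
  apply Finset.sum_congr rfl
  intro k _
  simp only [Function.comp]
  have h1 : (1 : ℤ) + (k:ℤ) = ((1+k : ℕ) : ℤ) := by push_cast; ring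
  simp only [h1, PySem.Int.mod_natCast]
  have h2 : ((m % (1+k) : ℕ) : ℤ) = 0 ↔ (1+k) ∣ m := by
    rw [Nat.cast_eq_zero, ← Nat.dvd_iff_mod_eq_zero]
  have h3 : ((1+k : ℕ) : ℤ) * ((1+k : ℕ) : ℤ) = (m:ℤ) ↔ (1+k)*(1+k) = m := by
    constructor
    · intro h; exact_mod_cast h
    · intro h; exact_mod_cast h
  norm_cast
  simp [Nat.dvd_iff_mod_eq_zero]

lemma card_big_eq_small (m : ℕ) (hm : 0 < m) :
    (m.divisors.filter (fun d => m < d*d)).card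
      = (m.divisors.filter (fun d => d*d < m)).card := by
  apply Finset.card_nbij' (fun d => m / d) (fun d => m / d)
  · intro d hd
    simp only [Finset.coe_filter, Set.mem_setOf_eq, Nat.mem_divisors] at hd ⊢
    obtain ⟨⟨hdvd, hm0⟩, hbig⟩ := hd
    have hd0 : 0 < d := Nat.pos_of_dvd_of_pos hdvd hm
    have he : m / d * d = m := Nat.div_mul_cancel hdvd
    have he0 : 0 < m / d := Nat.div_pos (Nat.le_of_dvd hm hdvd) hd0
    have h4 : m / d * d < d * d := by rw [he]; exact hbig
    have hlt : m / d < d := Nat.lt_of_mul_lt_mul_right h4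
    exact ⟨⟨Nat.div_dvd_of_dvd hdvd, hm0⟩, by nlinarith⟩
  · intro d hd
    simp only [Finset.coe_filter, Set.mem_setOf_eq, Nat.mem_divisors] at hd ⊢
    obtain ⟨⟨hdvd, hm0⟩, hsm⟩ := hd
    have hd0 : 0 < d := Nat.pos_of_dvd_of_pos hdvd hm
    have he : m / d * d = m := Nat.div_mul_cancel hdvd
    have h4 : d * d < m / d * d := by rw [he]; exact hsm
    have hlt : d < m / d := Nat.lt_of_mul_lt_mul_right h4
    exact ⟨⟨Nat.div_dvd_of_dvd hdvd, hm0⟩, by nlinarith⟩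
  · intro d hd
    simp only [Finset.coe_filter, Set.mem_setOf_eq, Nat.mem_divisors] at hd
    exact Nat.div_div_self hd.1.1 hd.1.2
  · intro d hd
    simp only [Finset.coe_filter, Set.mem_setOf_eq, Nat.mem_divisors] at hd
    exact Nat.div_div_self hd.1.1 hd.1.2

lemma key_nat (m : ℕ) (hm : 0 < m) :
    ((Finset.Ico 1 m).filter (· ∣ m)).card + 1
      = ((Finset.Icc 1 (Nat.sqrt m)).filter (· ∣ m)).card
        + ((Finset.Icc 1 (Nat.sqrt m)).filter (fun i => i ∣ m ∧ i*i ≠ m)).card := by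
  have hins : m.divisors = insert m ((Finset.Ico 1 m).filter (· ∣ m)) := by
    ext d
    simp only [Nat.mem_divisors, Finset.mem_insert, Finset.mem_filter, Finset.mem_Ico]
    constructor
    · rintro ⟨hd, -⟩
      have h1 := Nat.le_of_dvd hm hd
      have h2 := Nat.pos_of_dvd_of_pos hd hm
      rcases eq_or_lt_of_le h1 with h | h
      · left; exact h
      · right; exact ⟨⟨h2, h⟩, hd⟩
    · rintro (rfl | ⟨⟨h1, h2⟩, hd⟩)
      · exact ⟨dvd_rfl, by omega⟩
      · exact ⟨hd, by omega⟩
  have hcard : m.divisors.card = ((Finset.Ico 1 m).filter (· ∣ m)).card + 1 := by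
    rw [hins, Finset.card_insert_of_notMem (by simp [Finset.mem_filter])]
  have hS1 : (Finset.Icc 1 (Nat.sqrt m)).filter (· ∣ m)
      = m.divisors.filter (fun d => d*d ≤ m) := by
    ext d
    simp only [Finset.mem_filter, Finset.mem_Icc, Nat.mem_divisors, Nat.le_sqrt]
    constructor
    · rintro ⟨⟨h1, h2⟩, hd⟩; exact ⟨⟨hd, by omega⟩, h2⟩
    · rintro ⟨⟨hd, -⟩, h2⟩; exact ⟨⟨Nat.pos_of_dvd_of_pos hd hm, h2⟩, hd⟩
  have hS2 : (Finset.Icc 1 (Nat.sqrt m)).filter (fun i => i ∣ m ∧ i*i ≠ m)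
      = m.divisors.filter (fun d => d*d < m) := by
    ext d
    simp only [Finset.mem_filter, Finset.mem_Icc, Nat.mem_divisors, Nat.le_sqrt]
    constructor
    · rintro ⟨⟨h1, h2⟩, hd, hne⟩; exact ⟨⟨hd, by omega⟩, by omega⟩
    · rintro ⟨⟨hd, -⟩, h2⟩
      exact ⟨⟨Nat.pos_of_dvd_of_pos hd hm, by omega⟩, hd, by omega⟩
  have hsplit := Finset.card_filter_add_card_filter_not
    (s := m.divisors) (p := fun d => d*d ≤ m)
  have hnot : m.divisors.filter (fun d => ¬ d*d ≤ m)
      = m.divisors.filter (fun d => m < d*d) := by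
    apply Finset.filter_congr; intro d _; exact not_le
  rw [hnot] at hsplit
  have hbij := card_big_eq_small m hm
  rw [hS1, hS2]
  omega

lemma key (m : ℕ) (hm : 0 < m) :
    (∑ j ∈ Finset.Ico 1 m, (if j ∣ m then (1:ℤ) else 0)) + 1
      = ∑ i ∈ Finset.Icc 1 (Nat.sqrt m),
          (if i ∣ m then (if i*i = m then (1:ℤ) else 2) else 0) := by
  have hpt : ∀ i ∈ Finset.Icc 1 (Nat.sqrt m),
      (if i ∣ m then (if i*i = m then (1:ℤ) else 2) else 0)
        = (if i ∣ m then (1:ℤ) else 0) + (if i ∣ m ∧ i*i ≠ m then (1:ℤ) else 0) := by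
    intro i _
    by_cases h1 : i ∣ m <;> by_cases h2 : i*i = m <;> simp [h1, h2]
  rw [Finset.sum_congr rfl hpt, Finset.sum_add_distrib, Finset.sum_boole,
    Finset.sum_boole, Finset.sum_boole]
  exact_mod_cast key_nat m hm

-- ===== VERDICT (by name: the statement is the Claim_ definition above) =====
theorem solution_spec : Claim_equal_solution := by
  intro n _
  unfold Spec_solution
  by_cases hn : n ≤ 0
  · rw [solution, solutionLoop, if_neg (by omega), solution_alt, if_pos hn]
  · have hm : 0 < n.toNat := by omega
    have hn' : n = (n.toNat : ℤ) := by omega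
    rw [hn', solution_eq, alt_eq _ hm]
    have := key _ hm
    linarith
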